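-- pv_equiv track=rewrite | github.com/BassP97/Nurikabe-Code | nurikabeTest.py | minFitFunc
-- ===== SOURCE A (Python) =====
-- def minFitFunc(fitData, iters):
--     retArr = []
--     maxLen = 0
--     for i in range(iters):
--         temp = []
--         for arr in fitData:
--             try:
--                 temp.append(arr[i])
--             except:
--                 continue
--         try:
--             retArr.append(min(temp))
--         except:
--             retArr.append(0)
--     return retArr
-- ===== SOURCE B (Python) =====
-- def minFitFunc(fitData, iters):
--     # array-first accumulation: one pass over each array, sentinel None for empty columns
--     mins = [None] * max(iters, 0)
--     for arr in fitData:
--         for j in range(min(len(arr), len(mins))):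
--             v = arr[j]
--             mins[j] = v if mins[j] is None else min(mins[j], v)
--     return [0 if m is None else m for m in mins]
-- ===== Notes on version B (the rewrite author's own statement) =====
-- stated objective: faster
-- what changed: Column-first scanning that builds a temp list and calls min() per column (catching an exception per out-of-range array per column) is replaced by array-first accumulation of running per-index minima into a sentinel array, with the inner loop bounded by min(len(arr), iters) so no temporaries or exceptions are needed.
import Mathlib
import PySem

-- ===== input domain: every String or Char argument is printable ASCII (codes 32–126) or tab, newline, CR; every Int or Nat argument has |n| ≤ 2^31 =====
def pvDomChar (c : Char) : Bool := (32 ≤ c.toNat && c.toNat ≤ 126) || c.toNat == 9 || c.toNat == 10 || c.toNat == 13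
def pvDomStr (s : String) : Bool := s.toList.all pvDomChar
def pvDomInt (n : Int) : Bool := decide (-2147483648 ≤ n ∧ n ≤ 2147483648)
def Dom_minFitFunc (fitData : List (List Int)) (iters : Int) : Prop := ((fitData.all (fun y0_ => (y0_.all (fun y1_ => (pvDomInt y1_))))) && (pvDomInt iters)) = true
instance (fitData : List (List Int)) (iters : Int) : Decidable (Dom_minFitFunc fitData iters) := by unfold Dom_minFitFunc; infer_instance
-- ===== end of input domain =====

-- B replaces A's column-first scan (temp list + min() per column) by array-first
-- accumulation of running per-index minima into a sentinel array without per-column temporaries (objective: faster, measured).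


-- ===== PORT A =====
def minFitFunc (fitData : List (List Int)) (iters : Int) : List Int :=
  (PySem.List.pyRange 0 iters 1).foldl (fun retArr i =>
    let temp := fitData.foldl (fun temp arr =>
      match PySem.List.pyGet? arr i with      -- arr[i]; except: continue → skip
      | some v => temp ++ [v]
      | none => temp) []
    match PySem.List.min? temp (fun y => y) with   -- min(temp); except: append 0
    | some m => retArr ++ [m]
    | none => retArr ++ [0]) []

-- ===== PORT B =====
-- one array of B: fold j over range(min(len(arr), len(mins))), updating the running minimum at j
def pvStep (mins : List (Option Int)) (arr : List Int) : List (Option Int) :=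
  (List.range (min arr.length mins.length)).foldl (fun mins j =>
    let v := arr.getD j 0                     -- arr[j]; j < arr.length here, default unused
    mins.set j (some (match mins.getD j none with
      | none => v
      | some m => min m v))) mins

def minFitFunc_alt (fitData : List (List Int)) (iters : Int) : List Int :=
  let mins := fitData.foldl pvStep (List.replicate (max iters 0).toNat none)
  mins.map (fun m => match m with | none => 0 | some v => v)

-- ===== PRECONDITION & SPEC =====
def Spec_minFitFunc (fitData : List (List Int)) (iters : Int) (out : List Int) : Prop := out = minFitFunc_alt fitData iters
instance (fitData : List (List Int)) (iters : Int) (out : List Int) : Decidable (Spec_minFitFunc fitData iters out) := by unfold Spec_minFitFunc; infer_instance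

-- ===== CLAIM (what is proved, stated in full; the proofs are below) =====
def Claim_equal_minFitFunc : Prop := ∀ (fitData : List (List Int)) (iters : Int), Dom_minFitFunc fitData iters → Spec_minFitFunc fitData iters (minFitFunc fitData iters)

-- ===== LEMMAS AND PROOFS =====

-- running minimum on an Option Int accumulator
def pvOmin (o : Option Int) (v : Int) : Option Int :=
  some (match o with | none => v | some m => min m v)

-- the per-column accumulation both sides compute
def pvCol (fitData : List (List Int)) (j : Nat) : Option Int :=
  fitData.foldl (fun o arr => match arr[j]? with | some v => pvOmin o v | none => o) none

def pvVal (o : Option Int) : Int := match o with | none => 0 | some v => v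

theorem pv_foldl_omin (t : List Int) (x : Int) :
    t.foldl pvOmin (some x) = some (t.foldl min x) := by
  induction t generalizing x with
  | nil => rfl
  | cons y t ih => simp [List.foldl, pvOmin, ih]

theorem pv_min_match (l : List Int) :
    (match PySem.List.min? l (fun y => y) with | some m => m | none => 0)
      = pvVal (l.foldl pvOmin none) := by
  cases l with
  | nil => rfl
  | cons x t =>
    rw [PySem.List.min?_id_cons]
    show t.foldl min x = pvVal (t.foldl pvOmin (some x))
    rw [pv_foldl_omin]; rfl

theorem pv_temp_filterMap (fitData : List (List Int)) (f : List Int → Option Int)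
    (init : List Int) :
    fitData.foldl (fun temp arr => match f arr with
      | some v => temp ++ [v] | none => temp) init = init ++ fitData.filterMap f := by
  induction fitData generalizing init with
  | nil => simp
  | cons a t ih =>
    simp only [List.foldl, List.filterMap]
    cases f a <;> simp [ih]

theorem pv_filterMap_foldl (fitData : List (List Int)) (j : Nat) (init : Option Int) :
    fitData.foldl (fun o arr => match arr[j]? with
      | some v => pvOmin o v | none => o) init
      = (fitData.filterMap (fun arr => arr[j]?)).foldl pvOmin init := by
  induction fitData generalizing init with
  | nil => rfl
  | cons a t ih =>
    simp only [List.filterMap, List.foldl]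
    cases a[j]? <;> simp [ih]

-- A's result, in closed per-column form
theorem pvA_eq (fitData : List (List Int)) (iters : Int) :
    minFitFunc fitData iters
      = (List.range iters.toNat).map (fun j => pvVal (pvCol fitData j)) := by
  unfold minFitFunc
  have hbody : ∀ (retArr : List Int) (i : Int),
      (let temp := fitData.foldl (fun temp arr =>
        match PySem.List.pyGet? arr i with
        | some v => temp ++ [v] | none => temp) []
       match PySem.List.min? temp (fun y => y) with
       | some m => retArr ++ [m]
       | none => retArr ++ [0])
      = retArr ++ [(fun i => pvVal ((fitData.foldl (fun temp arr =>
          match PySem.List.pyGet? arr i with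
          | some v => temp ++ [v] | none => temp) []).foldl pvOmin none)) i] := by
    intro retArr i
    simp only
    rw [← pv_min_match]
    cases PySem.List.min? (fitData.foldl (fun temp arr =>
      match PySem.List.pyGet? arr i with
      | some v => temp ++ [v] | none => temp) []) (fun y => y) <;> rfl
  calc (PySem.List.pyRange 0 iters 1).foldl (fun retArr i =>
        let temp := fitData.foldl (fun temp arr =>
          match PySem.List.pyGet? arr i with
          | some v => temp ++ [v] | none => temp) []
        match PySem.List.min? temp (fun y => y) with
        | some m => retArr ++ [m]
        | none => retArr ++ [0]) []
      = (PySem.List.pyRange 0 iters 1).map (fun i =>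
          pvVal ((fitData.foldl (fun temp arr =>
            match PySem.List.pyGet? arr i with
            | some v => temp ++ [v] | none => temp) []).foldl pvOmin none)) := by
        rw [show (fun (retArr : List Int) (i : Int) =>
          let temp := fitData.foldl (fun temp arr =>
            match PySem.List.pyGet? arr i with
            | some v => temp ++ [v] | none => temp) []
          match PySem.List.min? temp (fun y => y) with
          | some m => retArr ++ [m]
          | none => retArr ++ [0]) = (fun retArr i => retArr ++ [(fun i =>
            pvVal ((fitData.foldl (fun temp arr =>
              match PySem.List.pyGet? arr i with
              | some v => temp ++ [v] | none => temp) []).foldl pvOmin none)) i])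
          from funext fun r => funext fun i => hbody r i]
        exact (PySem.List.foldl_append_singleton_eq_map _ _ _).trans (List.nil_append _)
    _ = _ := by
        rw [PySem.List.pyRange_one, List.map_map]
        simp only [Int.sub_zero]
        refine List.map_congr_left fun j _ => ?_
        simp only [Function.comp]
        rw [pv_temp_filterMap fitData (fun arr => PySem.List.pyGet? arr ((0:Int) + j)),
            List.nil_append]
        congr 1
        · rw [show pvCol fitData j = (fitData.filterMap (fun arr => arr[j]?)).foldl pvOmin none
            from pv_filterMap_foldl fitData j none]
          congr 1
          refine List.filterMap_congr fun arr _ => ?_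
          rw [show ((0:Int) + (j:Int)) = ((j:Nat):Int) by simp,
              PySem.List.pyGet?_natCast]

-- inner fold of pvStep, pointwise
theorem pvStep_get (mins : List (Option Int)) (arr : List Int) (m : Nat) :
    m ≤ min arr.length mins.length → ∀ j : Nat,
    ((List.range m).foldl (fun mins j =>
      mins.set j (some (match mins.getD j none with
        | none => arr.getD j 0
        | some x => min x (arr.getD j 0)))) mins)[j]?
    = if j < m then some (pvOmin (mins.getD j none) (arr.getD j 0)) else mins[j]? := by
  induction m with
  | zero => intro _ j; simp
  | succ m ih =>
    intro hm j
    have hm' : m ≤ min arr.length mins.length := by omega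
    rw [List.range_succ, List.foldl_append]
    simp only [List.foldl_cons, List.foldl_nil]
    have hlen : ∀ (l : List (Option Int)),
        ((List.range m).foldl (fun mins j =>
          mins.set j (some (match mins.getD j none with
            | none => arr.getD j 0
            | some x => min x (arr.getD j 0)))) l).length = l.length := by
      intro l
      induction List.range m generalizing l with
      | nil => rfl
      | cons a t ih2 => simp only [List.foldl_cons]; rw [ih2, List.length_set]
    set M := (List.range m).foldl (fun mins j =>
      mins.set j (some (match mins.getD j none with
        | none => arr.getD j 0
        | some x => min x (arr.getD j 0)))) mins with hM
    have hMm : M[m]? = mins[m]? := by rw [ih hm' m]; simp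
    have hMgetD : M.getD m none = mins.getD m none := by
      rw [List.getD_eq_getElem?_getD, List.getD_eq_getElem?_getD, hMm]
    rw [List.getElem?_set]
    by_cases hjm : m = j
    · subst hjm
      have hj : m < mins.length := by omega
      rw [if_pos rfl, if_pos (by rw [hlen]; omega), if_pos (by omega), hMgetD]
      rfl
    · rw [if_neg hjm, ih hm' j]
      by_cases hj : j < m
      · rw [if_pos hj, if_pos (by omega)]
      · rw [if_neg hj, if_neg (by omega)]

theorem pvStep_map (g : Nat → Option Int) (n : Nat) (arr : List Int) :
    pvStep ((List.range n).map g) arr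
      = (List.range n).map (fun j => match arr[j]? with
          | some v => pvOmin (g j) v | none => g j) := by
  unfold pvStep
  have hlenmap : ((List.range n).map g).length = n := by simp
  refine List.ext_getElem? fun j => ?_
  rw [pvStep_get _ arr _ (le_refl _) j]
  rw [hlenmap]
  by_cases hj : j < min arr.length n
  · have hja : j < arr.length := by omega
    have hjn : j < n := by omega
    rw [if_pos hj]
    have h1 : ((List.range n).map g).getD j none = g j := by
      rw [List.getD_eq_getElem?_getD]; simp [hjn]
    have h2 : arr.getD j 0 = arr[j] := List.getD_eq_getElem arr 0 hja
    rw [h1, h2]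
    simp [hjn, List.getElem?_eq_getElem hja]
  · rw [if_neg hj]
    by_cases hjn : j < n
    · have hja : ¬ j < arr.length := by omega
      simp [hjn, List.getElem?_eq_none_iff.mpr (by omega : arr.length ≤ j)]
    · have h0 : (List.range n)[j]? = none := by
        rw [List.getElem?_eq_none_iff]; simpa using (by omega : n ≤ j)
      simp [h0]

theorem pvFold_map (fitData : List (List Int)) (n : Nat) (g : Nat → Option Int) :
    fitData.foldl pvStep ((List.range n).map g)
      = (List.range n).map (fun j =>
          fitData.foldl (fun o arr => match arr[j]? with
            | some v => pvOmin o v | none => o) (g j)) := by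
  induction fitData generalizing g with
  | nil => simp
  | cons a t ih =>
    simp only [List.foldl]
    rw [pvStep_map, ih]

theorem pvB_eq (fitData : List (List Int)) (iters : Int) :
    minFitFunc_alt fitData iters
      = (List.range iters.toNat).map (fun j => pvVal (pvCol fitData j)) := by
  unfold minFitFunc_alt
  have hn : (max iters 0).toNat = iters.toNat := by omega
  have hrep : List.replicate iters.toNat (none : Option Int)
      = (List.range iters.toNat).map (fun _ => none) := by
    simp [List.map_const']
  simp only [hn, hrep]
  rw [pvFold_map, List.map_map]
  rfl

-- ===== VERDICT (by name: the statement is the Claim_ definition above) =====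
theorem minFitFunc_spec : Claim_equal_minFitFunc := by
  intro fitData iters _
  unfold Spec_minFitFunc
  rw [pvA_eq, pvB_eq]
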